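-- pv_equiv track=rewrite | github.com/plhosk/wordtracer | scripts/generate_boards.py | derive_walls_from_paths
-- ===== SOURCE A (Python) =====
-- def open_edge(
--     h: list[list[int]], v: list[list[int]], a: tuple[int, int], b: tuple[int, int]
-- ) -> None:
--     ar, ac = a
--     br, bc = b
--     if ar == br:
--         left = min(ac, bc)
--         v[ar][left] = 0
--         return
--     up = min(ar, br)
--     h[up][ac] = 0
--
-- def derive_walls_from_paths(
--     rows: int, cols: int, paths: dict[str, list[tuple[int, int]]]
-- ) -> tuple[list[list[int]], list[list[int]]]:
--     h = [[1 for _ in range(cols)] for _ in range(rows - 1)]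
--     v = [[1 for _ in range(cols - 1)] for _ in range(rows)]
--     for path in paths.values():
--         for idx in range(1, len(path)):
--             open_edge(h, v, path[idx - 1], path[idx])
--     return h, v
-- ===== SOURCE B (Python) =====
-- def derive_walls_from_paths(
--     rows: int, cols: int, paths: dict[str, list[tuple[int, int]]]
-- ) -> tuple[list[list[int]], list[list[int]]]:
--     # Demand-driven query: flatten every traced segment once, then iterate over
--     # the GRID; for each row keep only the segments whose wall lies on that row
--     # and decide each wall cell by scanning that row's segments.
--     segs = [seg for path in paths.values() for seg in zip(path, path[1:])]
--
--     def h_row(r):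
--         row_segs = [s for s in segs if s[0][0] != s[1][0] and min(s[0][0], s[1][0]) == r]
--         return [0 if any(s[0][1] == c for s in row_segs) else 1 for c in range(cols)]
--
--     def v_row(r):
--         row_segs = [s for s in segs if s[0][0] == s[1][0] and s[0][0] == r]
--         return [0 if any(min(s[0][1], s[1][1]) == c for s in row_segs) else 1
--                 for c in range(cols - 1)]
--
--     h = [h_row(r) for r in range(rows - 1)]
--     v = [v_row(r) for r in range(rows)]
--     return h, v
-- ===== Notes on version B (the rewrite author's own statement) =====
-- stated objective: alternative
-- what changed: B inverts the control flow: instead of allocating all-1 grids and mutating cells while walking the paths, it flattens every traced segment into one list and then iterates over the GRID, filtering per row the segments whose wall lies on that row and deciding each wall cell by scanning them (a demand-driven query, no mutable grid or accumulator).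
-- intended difference: On inputs where some traced segment has a negative wall coordinate whose wrapped cell is not also opened by a non-negative segment, A's list assignment wraps around and zeroes a wall on the opposite edge of the grid while B leaves that wall at 1; an out-of-grid path coordinate should not open a wall elsewhere, so B's value is the intended one. — e.g. on derive_walls_from_paths(2, 2, [("a", [(0, 0), (0, -1)])]): A returns ([[1, 1]], [[0], [1]]), B returns ([[1, 1]], [[1], [1]])
import Mathlib
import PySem

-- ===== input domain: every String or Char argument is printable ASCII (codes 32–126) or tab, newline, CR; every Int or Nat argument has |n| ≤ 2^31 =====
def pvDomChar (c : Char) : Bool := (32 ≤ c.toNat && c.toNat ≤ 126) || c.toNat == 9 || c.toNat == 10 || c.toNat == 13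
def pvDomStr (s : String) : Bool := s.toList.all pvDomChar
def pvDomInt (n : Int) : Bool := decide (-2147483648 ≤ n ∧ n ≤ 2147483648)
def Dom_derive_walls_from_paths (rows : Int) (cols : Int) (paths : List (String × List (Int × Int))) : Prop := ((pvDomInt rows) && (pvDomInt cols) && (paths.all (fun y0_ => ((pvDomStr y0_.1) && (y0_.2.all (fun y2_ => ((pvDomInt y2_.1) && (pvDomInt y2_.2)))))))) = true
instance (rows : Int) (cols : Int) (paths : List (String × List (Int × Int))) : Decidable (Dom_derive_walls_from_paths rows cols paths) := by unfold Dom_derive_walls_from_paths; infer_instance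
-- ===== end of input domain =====

-- B inverts A's control flow: it flattens the traced segments once and then iterates over the
-- GRID, per row filtering the segments whose wall lies on that row and deciding each wall cell
-- by scanning them, instead of mutating all-1 grids while walking the paths (objective:
-- alternative algorithm, demand-driven per-row/per-cell query).

-- ===== PORT A =====
-- g[r][c] = x with Python indexing (negative indices wrap); exact wherever Python does not raise
def pyWrite (g : List (List Int)) (r c : Int) (x : Int) : List (List Int) :=
  PySem.List.pySetD g r (PySem.List.pySetD (PySem.List.pyGetD g r []) c x)

def open_edge (h v : List (List Int)) (a b : Int × Int) :
    List (List Int) × List (List Int) :=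
  if a.1 = b.1 then
    (h, pyWrite v a.1 (min a.2 b.2) 0)
  else
    (pyWrite h (min a.1 b.1) a.2 0, v)

def derive_walls_from_paths (rows : Int) (cols : Int) (paths : List (String × List (Int × Int))) : List (List Int) × List (List Int) :=
  let h := (PySem.List.pyRange 0 (rows - 1)).map (fun _ => (PySem.List.pyRange 0 cols).map (fun _ => (1 : Int)))
  let v := (PySem.List.pyRange 0 rows).map (fun _ => (PySem.List.pyRange 0 (cols - 1)).map (fun _ => (1 : Int)))
  ((PySem.Dict.ofList paths).values).foldl (fun hv path =>
      (PySem.List.pyRange 1 (path.length : Int)).foldl (fun hv idx =>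
        open_edge hv.1 hv.2 (PySem.List.pyGetD path (idx - 1) (0, 0))
          (PySem.List.pyGetD path idx (0, 0))) hv)
    (h, v)

-- ===== PORT B =====
def derive_walls_from_paths_alt (rows : Int) (cols : Int) (paths : List (String × List (Int × Int))) : List (List Int) × List (List Int) :=
  -- segs = [seg for path in paths.values() for seg in zip(path, path[1:])]
  let segs := ((PySem.Dict.ofList paths).values).flatMap
    (fun path => path.zip (PySem.List.slice path (some 1) none))
  -- h_row(r): keep the segments whose horizontal wall lies on row r, then scan them per cell
  let h_row := fun (r : Int) =>
    let row_segs := segs.filter (fun s =>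
      decide (¬ s.1.1 = s.2.1) && decide (min s.1.1 s.2.1 = r))
    (PySem.List.pyRange 0 cols).map (fun c =>
      if row_segs.any (fun s => decide (s.1.2 = c)) then (0 : Int) else 1)
  -- v_row(r): same for the vertical walls of row r
  let v_row := fun (r : Int) =>
    let row_segs := segs.filter (fun s =>
      decide (s.1.1 = s.2.1) && decide (s.1.1 = r))
    (PySem.List.pyRange 0 (cols - 1)).map (fun c =>
      if row_segs.any (fun s => decide (min s.1.2 s.2.2 = c)) then (0 : Int) else 1)
  ((PySem.List.pyRange 0 (rows - 1)).map h_row,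
   (PySem.List.pyRange 0 rows).map v_row)

-- ===== PRECONDITION & SPEC =====
-- Python's negative-index wrap
def wrap (n x : Int) : Int := x + if x < 0 then n else 0

-- for every consecutive cell pair of the path values Python's dict keeps: the dimensions
-- (rows, cols) of the wall grid the segment writes into and its raw wall coordinate
def tracedWalls (rows cols : Int) (paths : List (String × List (Int × Int))) :
    List ((Int × Int) × (Int × Int)) :=
  (PySem.Dict.ofList paths).values.flatMap fun p =>
    (p.zip p.tail).map fun s =>
      if s.1.1 = s.2.1 then ((rows, cols - 1), s.1.1, min s.1.2 s.2.2)
      else ((rows - 1, cols), min s.1.1 s.2.1, s.1.2)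

-- Pre_ excludes exactly the inputs on which A raises IndexError: some traced segment's wall
-- coordinate lies outside its grid even after Python's negative-index wrap.
def Pre_derive_walls_from_paths (rows : Int) (cols : Int) (paths : List (String × List (Int × Int))) : Prop :=
  ∀ t ∈ tracedWalls rows cols paths,
    -t.1.1 ≤ t.2.1 ∧ t.2.1 < t.1.1 ∧ -t.1.2 ≤ t.2.2 ∧ t.2.2 < t.1.2

instance (rows : Int) (cols : Int) (paths : List (String × List (Int × Int))) : Decidable (Pre_derive_walls_from_paths rows cols paths) := by
  unfold Pre_derive_walls_from_paths; infer_instance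

def pvWitness_derive_walls_from_paths : Int × Int × (List (String × List (Int × Int))) :=
  (2, 2, [("a", [(0, 0), (0, 1)])])

-- On inputs where some traced segment has a negative wall coordinate whose wrapped cell is not
-- also opened by a non-negative segment, A's list assignment wraps around and zeroes a wall on
-- the opposite edge of the grid, while B leaves that wall at 1; an out-of-grid path coordinate
-- should not open a wall elsewhere, so B's value is the intended one.
def D_derive_walls_from_paths (rows : Int) (cols : Int) (paths : List (String × List (Int × Int))) : Prop :=
  ∃ s ∈ tracedWalls rows cols paths, s.2.1 ⊓ s.2.2 < 0 ∧
    ∀ t ∈ tracedWalls rows cols paths,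
      t.1 = s.1 → (0, 0) ≤ t.2 → t.2 ≠ (wrap s.1.1 s.2.1, wrap s.1.2 s.2.2)

instance (rows : Int) (cols : Int) (paths : List (String × List (Int × Int))) : Decidable (D_derive_walls_from_paths rows cols paths) := by
  unfold D_derive_walls_from_paths; infer_instance

def Spec_derive_walls_from_paths (rows : Int) (cols : Int) (paths : List (String × List (Int × Int))) (out : List (List Int) × List (List Int)) : Prop :=
  ¬ D_derive_walls_from_paths rows cols paths → out = derive_walls_from_paths_alt rows cols paths
instance (rows : Int) (cols : Int) (paths : List (String × List (Int × Int))) (out : List (List Int) × List (List Int)) : Decidable (Spec_derive_walls_from_paths rows cols paths out) := by unfold Spec_derive_walls_from_paths; infer_instance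

def pvDiffWitness_derive_walls_from_paths : Int × Int × (List (String × List (Int × Int))) :=
  (2, 2, [("a", [(0, 0), (0, -1)])])

def pvDiffWitnessOut_derive_walls_from_paths :
    (List (List Int) × List (List Int)) × (List (List Int) × List (List Int)) :=
  (([[1, 1]], [[0], [1]]), ([[1, 1]], [[1], [1]]))

-- ===== CLAIM (what is proved, stated in full; the proofs are below) =====
def Claim_unchanged_derive_walls_from_paths : Prop := ∀ (rows : Int) (cols : Int) (paths : List (String × List (Int × Int))), Dom_derive_walls_from_paths rows cols paths → Pre_derive_walls_from_paths rows cols paths → Spec_derive_walls_from_paths rows cols paths (derive_walls_from_paths rows cols paths)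

def Claim_changed_derive_walls_from_paths : Prop := Dom_derive_walls_from_paths (pvDiffWitness_derive_walls_from_paths.1) (pvDiffWitness_derive_walls_from_paths.2.1) (pvDiffWitness_derive_walls_from_paths.2.2) ∧ Pre_derive_walls_from_paths (pvDiffWitness_derive_walls_from_paths.1) (pvDiffWitness_derive_walls_from_paths.2.1) (pvDiffWitness_derive_walls_from_paths.2.2) ∧ D_derive_walls_from_paths (pvDiffWitness_derive_walls_from_paths.1) (pvDiffWitness_derive_walls_from_paths.2.1) (pvDiffWitness_derive_walls_from_paths.2.2) ∧ derive_walls_from_paths (pvDiffWitness_derive_walls_from_paths.1) (pvDiffWitness_derive_walls_from_paths.2.1) (pvDiffWitness_derive_walls_from_paths.2.2) = pvDiffWitnessOut_derive_walls_from_paths.1 ∧ derive_walls_from_paths_alt (pvDiffWitness_derive_walls_from_paths.1) (pvDiffWitness_derive_walls_from_paths.2.1) (pvDiffWitness_derive_walls_from_paths.2.2) = pvDiffWitnessOut_derive_walls_from_paths.2 ∧ pvDiffWitnessOut_derive_walls_from_paths.1 ≠ pvDiffWitnessOut_derive_walls_from_paths.2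

def Claim_exact_derive_walls_from_paths : Prop := ∀ (rows : Int) (cols : Int) (paths : List (String × List (Int × Int))), Dom_derive_walls_from_paths rows cols paths → Pre_derive_walls_from_paths rows cols paths → D_derive_walls_from_paths rows cols paths → derive_walls_from_paths rows cols paths ≠ derive_walls_from_paths_alt rows cols paths

-- ===== LEMMAS AND PROOFS =====

-- proof-side views of the input
def isV (s : (Int × Int) × (Int × Int)) : Bool := decide (s.1.1 = s.2.1)

def wTgt (s : (Int × Int) × (Int × Int)) : Int × Int :=
  if s.1.1 = s.2.1 then (s.1.1, min s.1.2 s.2.2) else (min s.1.1 s.2.1, s.1.2)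

def segNeg (s : (Int × Int) × (Int × Int)) : Bool :=
  decide ((wTgt s).1 < 0 ∨ (wTgt s).2 < 0)

def dimsOf (rows cols : Int) (s : (Int × Int) × (Int × Int)) : Int × Int :=
  if isV s then (rows, cols - 1) else (rows - 1, cols)

def segOK (rows cols : Int) (s : (Int × Int) × (Int × Int)) : Bool :=
  if s.1.1 = s.2.1 then
    decide (-rows ≤ (wTgt s).1 ∧ (wTgt s).1 < rows ∧
      -(cols - 1) ≤ (wTgt s).2 ∧ (wTgt s).2 < cols - 1)
  else
    decide (-(rows - 1) ≤ (wTgt s).1 ∧ (wTgt s).1 < rows - 1 ∧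
      -cols ≤ (wTgt s).2 ∧ (wTgt s).2 < cols)

-- all consecutive cell pairs traced by the dict's path values (proof-side view of the input)
def segsOf (paths : List (String × List (Int × Int))) : List ((Int × Int) × (Int × Int)) :=
  ((PySem.Dict.ofList paths).values).flatMap (fun p => p.zip p.tail)

lemma tracedWalls_eq (rows cols : Int) (paths : List (String × List (Int × Int))) :
    tracedWalls rows cols paths
      = (segsOf paths).map (fun s => (dimsOf rows cols s, wTgt s)) := by
  unfold tracedWalls segsOf
  rw [List.map_flatMap]
  have hfun : (fun s : (Int × Int) × (Int × Int) =>
      if s.1.1 = s.2.1 then ((rows, cols - 1), s.1.1, min s.1.2 s.2.2)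
      else ((rows - 1, cols), min s.1.1 s.2.1, s.1.2))
      = fun s => (dimsOf rows cols s, wTgt s) := by
    funext s
    unfold dimsOf wTgt isV
    by_cases h : s.1.1 = s.2.1 <;> simp [h]
  rw [hfun]

lemma dims_eq_iff (rows cols : Int) (t s : (Int × Int) × (Int × Int)) :
    dimsOf rows cols t = dimsOf rows cols s ↔ isV t = isV s := by
  unfold dimsOf
  by_cases h1 : isV t <;> by_cases h2 : isV s <;>
    simp [h1, h2, Prod.ext_iff]

lemma segNeg_false_iff (s : (Int × Int) × (Int × Int)) :
    segNeg s = false ↔ (0 ≤ (wTgt s).1 ∧ 0 ≤ (wTgt s).2) := by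
  simp [segNeg, not_lt]

lemma wrap_dims (rows cols : Int) (s : (Int × Int) × (Int × Int)) :
    (wrap (dimsOf rows cols s).1 (wTgt s).1, wrap (dimsOf rows cols s).2 (wTgt s).2)
      = (if isV s then (wrap rows (wTgt s).1, wrap (cols - 1) (wTgt s).2)
         else (wrap (rows - 1) (wTgt s).1, wrap cols (wTgt s).2)) := by
  unfold dimsOf
  by_cases h : isV s <;> simp [h]

lemma pre_iff (rows cols : Int) (paths : List (String × List (Int × Int))) :
    Pre_derive_walls_from_paths rows cols paths ↔
      ∀ s ∈ segsOf paths, segOK rows cols s = true := by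
  unfold Pre_derive_walls_from_paths
  rw [tracedWalls_eq]
  constructor
  · intro h s hs
    have hx := h _ (List.mem_map_of_mem hs)
    by_cases hv : s.1.1 = s.2.1
    · simp [dimsOf, isV, hv] at hx
      simp [segOK, hv]
      omega
    · simp [dimsOf, isV, hv] at hx
      simp [segOK, hv]
      omega
  · intro h t ht
    obtain ⟨s, hs, rfl⟩ := List.mem_map.1 ht
    have hx := h s hs
    by_cases hv : s.1.1 = s.2.1
    · simp [segOK, hv] at hx
      simp [dimsOf, isV, hv]
      omega
    · simp [segOK, hv] at hx
      simp [dimsOf, isV, hv]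
      omega

lemma d_iff (rows cols : Int) (paths : List (String × List (Int × Int))) :
    D_derive_walls_from_paths rows cols paths ↔
      ∃ s ∈ segsOf paths, segNeg s = true ∧
        ∀ t ∈ segsOf paths, ¬ (isV t = isV s ∧ segNeg t = false ∧
          wTgt t = (if isV s then (wrap rows (wTgt s).1, wrap (cols - 1) (wTgt s).2)
                    else (wrap (rows - 1) (wTgt s).1, wrap cols (wTgt s).2))) := by
  unfold D_derive_walls_from_paths
  rw [tracedWalls_eq]
  constructor
  · rintro ⟨s', hs', hneg', hcond⟩
    obtain ⟨s, hs, rfl⟩ := List.mem_map.1 hs'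
    have hneg : segNeg s = true := by
      dsimp only at hneg'
      simp only [segNeg, decide_eq_true_eq]
      omega
    refine ⟨s, hs, hneg, ?_⟩
    rintro t ht ⟨hityp, htneg, htw⟩
    obtain ⟨h1, h2⟩ := (segNeg_false_iff t).1 htneg
    exact hcond _ (List.mem_map_of_mem ht) ((dims_eq_iff rows cols t s).2 hityp)
      (Prod.mk_le_mk.2 ⟨h1, h2⟩) (by rw [htw, wrap_dims rows cols s])
  · rintro ⟨s, hs, hneg, hcomp⟩
    refine ⟨_, List.mem_map_of_mem hs, by
      simp only [segNeg, decide_eq_true_eq] at hneg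
      dsimp only
      omega, ?_⟩
    rintro t' ht' hdims h12 htw
    obtain ⟨t, ht, rfl⟩ := List.mem_map.1 ht'
    have h12' := Prod.mk_le_mk.1 h12
    exact hcomp t ht
      ⟨(dims_eq_iff rows cols t s).1 hdims,
       (segNeg_false_iff t).2 ⟨h12'.1, h12'.2⟩,
       htw.trans (wrap_dims rows cols s)⟩

-- the grid rendered from a set of open-wall coordinates (proof-side view of both ports)
def renderGrid (nR nC : Int) (S : PySem.Set (Int × Int)) : List (List Int) :=
  (PySem.List.pyRange 0 nR).map (fun r =>
    (PySem.List.pyRange 0 nC).map (fun c =>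
      if PySem.Set.contains S (r, c) then (0 : Int) else 1))

-- fold shape accumulating the opened coordinates (proof-side): add fH's coordinate to the
-- h-set on an h-segment, fV's to the v-set on a v-segment
def addBy (fH fV : (Int × Int) × (Int × Int) → Int × Int)
    (ss : PySem.Set (Int × Int) × PySem.Set (Int × Int))
    (s : (Int × Int) × (Int × Int)) :
    PySem.Set (Int × Int) × PySem.Set (Int × Int) :=
  if s.1.1 = s.2.1 then (ss.1, PySem.Set.add ss.2 (fV s))
  else (PySem.Set.add ss.1 (fH s), ss.2)

lemma contains_add {S : PySem.Set (Int × Int)} {p q : Int × Int} :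
    PySem.Set.contains (PySem.Set.add S p) q = (PySem.Set.contains S q || decide (q = p)) := by
  simp [PySem.Set.contains_eq_listContains, List.contains_eq_mem, PySem.Set.mem_add]

lemma contains_congr {S T : PySem.Set (Int × Int)} {x : Int × Int}
    (h : x ∈ S ↔ x ∈ T) : PySem.Set.contains S x = PySem.Set.contains T x := by
  simp [PySem.Set.contains_eq_listContains, List.contains_eq_mem, h]

lemma pyGetD_wrap {α : Type} (xs : List α) (i : Int) (d : α)
    (h1 : -(xs.length : Int) ≤ i) (h2 : i < (xs.length : Int)) :
    PySem.List.pyGetD xs i d = xs.getD (wrap (xs.length : Int) i).toNat d := by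
  unfold PySem.List.pyGetD PySem.List.pyGet? PySem.List.pyIdx? wrap
  by_cases h : 0 ≤ i
  · rw [if_pos h, if_pos h2, if_neg (by omega)]
    simp [List.getD]
  · rw [if_neg h, if_pos h1, if_pos (by omega)]
    have : xs.length - (-i).toNat = (i + (xs.length : Int)).toNat := by omega
    simp [this, List.getD]

lemma pySetD_wrap {α : Type} (xs : List α) (i : Int) (v : α)
    (h1 : -(xs.length : Int) ≤ i) (h2 : i < (xs.length : Int)) :
    PySem.List.pySetD xs i v = xs.set (wrap (xs.length : Int) i).toNat v := by
  unfold PySem.List.pySetD PySem.List.pySet? PySem.List.pyIdx? wrap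
  by_cases h : 0 ≤ i
  · rw [if_pos h, if_pos h2, if_neg (by omega)]
    simp
  · rw [if_neg h, if_pos h1, if_pos (by omega)]
    have : xs.length - (-i).toNat = (i + (xs.length : Int)).toNat := by omega
    simp [this]

lemma getD_map_pyRange {α : Type} (n : Int) (f : Int → α) (d : α) (k : Nat) (hk : k < n.toNat) :
    ((PySem.List.pyRange 0 n).map f).getD k d = f (k : Int) := by
  rw [List.getD_eq_getElem?_getD]
  have hlen : k < ((PySem.List.pyRange 0 n).map f).length := by
    simp [PySem.List.length_pyRange_one]; omega
  rw [List.getElem?_eq_getElem hlen]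
  simp [PySem.List.getElem_pyRange_one]

lemma pyWrite_render (nR nC : Int) (S : PySem.Set (Int × Int)) (r c : Int)
    (hr : -nR ≤ r) (hr2 : r < nR) (hc : -nC ≤ c) (hc2 : c < nC) :
    pyWrite (renderGrid nR nC S) r c 0
      = renderGrid nR nC (PySem.Set.add S (wrap nR r, wrap nC c)) := by
  have hnR : 0 < nR := by omega
  have hnC : 0 < nC := by omega
  have hr'0 : 0 ≤ wrap nR r := by unfold wrap; split_ifs <;> omega
  have hr'2 : wrap nR r < nR := by unfold wrap; split_ifs <;> omega
  have hc'0 : 0 ≤ wrap nC c := by unfold wrap; split_ifs <;> omega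
  have hc'2 : wrap nC c < nC := by unfold wrap; split_ifs <;> omega
  unfold pyWrite
  have hlenG : ((renderGrid nR nC S) : List (List Int)).length = nR.toNat := by
    simp [renderGrid, PySem.List.length_pyRange_one]
  have hwlen : wrap ((nR.toNat : Int)) r = wrap nR r := by
    unfold wrap; split_ifs <;> omega
  rw [pyGetD_wrap _ r [] (by rw [hlenG]; omega) (by rw [hlenG]; omega),
      pySetD_wrap _ r _ (by rw [hlenG]; omega) (by rw [hlenG]; omega), hlenG, hwlen]
  rw [show (renderGrid nR nC S) = ((PySem.List.pyRange 0 nR).map (fun r =>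
    (PySem.List.pyRange 0 nC).map (fun c =>
      if PySem.Set.contains S (r, c) then (0 : Int) else 1))) from rfl]
  rw [getD_map_pyRange nR _ [] (wrap nR r).toNat (by omega)]
  have hrow : ((wrap nR r).toNat : Int) = wrap nR r := by omega
  rw [hrow]
  have hrowlen : ((PySem.List.pyRange 0 nC).map (fun c =>
      if PySem.Set.contains S (wrap nR r, c) then (0 : Int) else 1)).length = nC.toNat := by
    simp [PySem.List.length_pyRange_one]
  rw [pySetD_wrap _ c _ (by rw [hrowlen]; omega) (by rw [hrowlen]; omega), hrowlen]
  have hwlenC : wrap ((nC.toNat : Int)) c = wrap nC c := by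
    unfold wrap; split_ifs <;> omega
  rw [hwlenC]
  unfold renderGrid
  apply List.ext_getElem
  · simp
  · intro i h1 h2
    have hiN : i < nR.toNat := by simpa [PySem.List.length_pyRange_one] using h2
    simp only [List.getElem_set, List.getElem_map, PySem.List.getElem_pyRange_one, zero_add]
    by_cases hir : (wrap nR r).toNat = i
    · have hri : ((i : Int)) = wrap nR r := by omega
      rw [if_pos hir]
      apply List.ext_getElem
      · simp
      · intro j g1 g2
        have hjN : j < nC.toNat := by simpa [PySem.List.length_pyRange_one] using g1
        simp only [List.getElem_set, List.getElem_map, PySem.List.getElem_pyRange_one, zero_add]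
        rw [contains_add, hri]
        by_cases hjc : (wrap nC c).toNat = j
        · have hcj : ((j : Int)) = wrap nC c := by omega
          rw [if_pos hjc]
          simp [hcj]
        · have hcj : ¬ ((j : Int) = wrap nC c) := by omega
          rw [if_neg hjc]
          simp [Prod.ext_iff, hcj]
    · have hri : ¬ ((i : Int) = wrap nR r) := by omega
      rw [if_neg hir]
      have hcongr : ∀ cc : Int,
          PySem.Set.contains (PySem.Set.add S (wrap nR r, wrap nC c)) ((i : Int), cc)
            = PySem.Set.contains S ((i : Int), cc) := by
        intro cc
        rw [contains_add]
        simp [Prod.ext_iff, hri]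
      simp only [hcongr]

lemma open_edge_render (rows cols : Int) (S T : PySem.Set (Int × Int))
    (s : (Int × Int) × (Int × Int)) (h : segOK rows cols s = true) :
    open_edge (renderGrid (rows - 1) cols S) (renderGrid rows (cols - 1) T) s.1 s.2
      = (renderGrid (rows - 1) cols
           (addBy (fun s => (wrap (rows - 1) (wTgt s).1, wrap cols (wTgt s).2))
                  (fun s => (wrap rows (wTgt s).1, wrap (cols - 1) (wTgt s).2)) (S, T) s).1,
         renderGrid rows (cols - 1)
           (addBy (fun s => (wrap (rows - 1) (wTgt s).1, wrap cols (wTgt s).2))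
                  (fun s => (wrap rows (wTgt s).1, wrap (cols - 1) (wTgt s).2)) (S, T) s).2) := by
  unfold segOK at h
  unfold open_edge addBy wTgt
  unfold wTgt at h
  by_cases he : s.1.1 = s.2.1
  · rw [if_pos he] at h
    simp only [if_pos he, decide_eq_true_eq] at h ⊢
    rw [pyWrite_render rows (cols - 1) T s.1.1 (min s.1.2 s.2.2)
      (by omega) (by omega) (by omega) (by omega)]
  · rw [if_neg he] at h
    simp only [if_neg he, decide_eq_true_eq] at h ⊢
    rw [pyWrite_render (rows - 1) cols S (min s.1.1 s.2.1) s.1.2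
      (by omega) (by omega) (by omega) (by omega)]

lemma fold_render (rows cols : Int) (segs : List ((Int × Int) × (Int × Int)))
    (hok : ∀ s ∈ segs, segOK rows cols s = true) :
    ∀ (S T : PySem.Set (Int × Int)),
      segs.foldl (fun hv s => open_edge hv.1 hv.2 s.1 s.2)
        (renderGrid (rows - 1) cols S, renderGrid rows (cols - 1) T)
      = (renderGrid (rows - 1) cols
           (segs.foldl (addBy (fun s => (wrap (rows - 1) (wTgt s).1, wrap cols (wTgt s).2))
                (fun s => (wrap rows (wTgt s).1, wrap (cols - 1) (wTgt s).2))) (S, T)).1,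
         renderGrid rows (cols - 1)
           (segs.foldl (addBy (fun s => (wrap (rows - 1) (wTgt s).1, wrap cols (wTgt s).2))
                (fun s => (wrap rows (wTgt s).1, wrap (cols - 1) (wTgt s).2))) (S, T)).2) := by
  induction segs with
  | nil => intro S T; rfl
  | cons s rest ih =>
    intro S T
    have hs := hok s (by simp)
    have hrest : ∀ x ∈ rest, segOK rows cols x = true := fun x hx => hok x (by simp [hx])
    simp only [List.foldl_cons]
    rw [open_edge_render rows cols S T s hs]
    exact ih hrest _ _

-- membership in the sets accumulated by an addBy fold
lemma mem_foldl_addBy_fst (fH fV : (Int × Int) × (Int × Int) → Int × Int) :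
    ∀ (segs : List ((Int × Int) × (Int × Int)))
      (ss : PySem.Set (Int × Int) × PySem.Set (Int × Int)) (x : Int × Int),
      (x ∈ (segs.foldl (addBy fH fV) ss).1 ↔
        x ∈ ss.1 ∨ ∃ s ∈ segs, ¬ s.1.1 = s.2.1 ∧ x = fH s) ∧
      (x ∈ (segs.foldl (addBy fH fV) ss).2 ↔
        x ∈ ss.2 ∨ ∃ s ∈ segs, s.1.1 = s.2.1 ∧ x = fV s) := by
  intro segs
  induction segs with
  | nil => intro ss x; simp
  | cons s rest ih =>
    intro ss x
    simp only [List.foldl_cons]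
    constructor
    · rw [(ih (addBy fH fV ss s) x).1]
      unfold addBy
      by_cases he : s.1.1 = s.2.1 <;>
        simp [he, PySem.Set.mem_add] <;> tauto
    · rw [(ih (addBy fH fV ss s) x).2]
      unfold addBy
      by_cases he : s.1.1 = s.2.1 <;>
        simp [he, PySem.Set.mem_add] <;> tauto

lemma renderGrid_congr (nR nC : Int) (S T : PySem.Set (Int × Int))
    (h : ∀ r c : Int, 0 ≤ r → r < nR → 0 ≤ c → c < nC → ((r, c) ∈ S ↔ (r, c) ∈ T)) :
    renderGrid nR nC S = renderGrid nR nC T := by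
  unfold renderGrid
  apply List.ext_getElem
  · simp
  · intro i h1 h2
    simp only [List.getElem_map, PySem.List.getElem_pyRange_one, zero_add]
    have hiN : i < nR.toNat := by simpa [PySem.List.length_pyRange_one] using h1
    apply List.ext_getElem
    · simp
    · intro j g1 g2
      have hjN : j < nC.toNat := by simpa [PySem.List.length_pyRange_one] using g1
      simp only [List.getElem_map, PySem.List.getElem_pyRange_one, zero_add]
      rw [contains_congr (h i j (by omega) (by omega) (by omega) (by omega))]

-- the grid entry at a non-negative in-range coordinate
lemma renderGrid_entry (nR nC : Int) (S : PySem.Set (Int × Int)) (r c : Int)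
    (hr : 0 ≤ r) (hr2 : r < nR) (hc : 0 ≤ c) (hc2 : c < nC) :
    ((renderGrid nR nC S).getD r.toNat []).getD c.toNat 2
      = if PySem.Set.contains S (r, c) then 0 else 1 := by
  unfold renderGrid
  rw [getD_map_pyRange nR _ [] r.toNat (by omega),
      getD_map_pyRange nC _ 2 c.toNat (by omega)]
  rw [show ((r.toNat : Int)) = r by omega, show ((c.toNat : Int)) = c by omega]

lemma zipFoldAux {σ α : Type} (F : σ → α → α → σ) (d : α) :
    ∀ (xs : List α) (x : α) (acc : σ),
      (List.range xs.length).foldl (fun a k =>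
          F a ((x :: xs).getD k d) ((x :: xs).getD (k + 1) d)) acc
        = ((x :: xs).zip xs).foldl (fun a s => F a s.1 s.2) acc := by
  intro xs
  induction xs with
  | nil => intro x acc; rfl
  | cons y ys ih =>
    intro x acc
    rw [show (y :: ys).length = ys.length + 1 from rfl, List.range_succ_eq_map]
    simp only [List.foldl_cons, List.foldl_map, List.getD_cons_zero, List.getD_cons_succ,
      Nat.succ_eq_add_one, List.zip_cons_cons]
    exact ih y (F acc x y)

-- A's index loop over range(1, len(path)) is the fold over consecutive pairs
lemma innerA {σ : Type} (F : σ → (Int × Int) → (Int × Int) → σ) (path : List (Int × Int)) (acc : σ) :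
    (PySem.List.pyRange 1 (path.length : Int)).foldl (fun a idx =>
        F a (PySem.List.pyGetD path (idx - 1) (0, 0)) (PySem.List.pyGetD path idx (0, 0))) acc
      = (path.zip path.tail).foldl (fun a s => F a s.1 s.2) acc := by
  cases path with
  | nil => rfl
  | cons x xs =>
    rw [PySem.List.pyRange_one]
    have hlen : ((((x :: xs).length : Int)) - 1).toNat = xs.length := by simp
    rw [hlen, List.foldl_map]
    have hstep : ∀ (a : σ) (k : Nat),
        F a (PySem.List.pyGetD (x :: xs) ((1 + (k : Int)) - 1) (0, 0))
            (PySem.List.pyGetD (x :: xs) (1 + (k : Int)) (0, 0))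
          = F a ((x :: xs).getD k (0, 0)) ((x :: xs).getD (k + 1) (0, 0)) := by
      intro a k
      have h1 : (1 + (k : Int)) - 1 = (k : Int) := by ring
      have h2 : (1 + (k : Int)) = ((k + 1 : Nat) : Int) := by push_cast; ring
      rw [h1, h2, PySem.List.pyGetD_natCast, PySem.List.pyGetD_natCast]
    simp only [hstep]
    exact zipFoldAux F (0, 0) xs x acc

lemma foldl_foldl_flatMap {σ α β : Type} (f : σ → β → σ) (g : α → List β) (l : List α) :
    ∀ acc, l.foldl (fun acc x => (g x).foldl f acc) acc = (l.flatMap g).foldl f acc := by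
  induction l with
  | nil => intro acc; rfl
  | cons x xs ih => intro acc; simp [List.foldl_append, ih]

-- port A, reduced to renders of the accumulated coordinate sets
lemma portA_eq_render (rows cols : Int) (paths : List (String × List (Int × Int)))
    (hPre : ∀ s ∈ segsOf paths, segOK rows cols s = true) :
    derive_walls_from_paths rows cols paths
      = (renderGrid (rows - 1) cols
           ((segsOf paths).foldl (addBy (fun s => (wrap (rows - 1) (wTgt s).1, wrap cols (wTgt s).2))
                (fun s => (wrap rows (wTgt s).1, wrap (cols - 1) (wTgt s).2)))
             (PySem.Set.empty, PySem.Set.empty)).1,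
         renderGrid rows (cols - 1)
           ((segsOf paths).foldl (addBy (fun s => (wrap (rows - 1) (wTgt s).1, wrap cols (wTgt s).2))
                (fun s => (wrap rows (wTgt s).1, wrap (cols - 1) (wTgt s).2)))
             (PySem.Set.empty, PySem.Set.empty)).2) := by
  unfold derive_walls_from_paths
  have hA : (fun (hv : List (List Int) × List (List Int)) (path : List (Int × Int)) =>
        (PySem.List.pyRange 1 (path.length : Int)).foldl (fun hv idx =>
          open_edge hv.1 hv.2 (PySem.List.pyGetD path (idx - 1) (0, 0))
            (PySem.List.pyGetD path idx (0, 0))) hv)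
      = fun hv path => (path.zip path.tail).foldl (fun a s => open_edge a.1 a.2 s.1 s.2) hv := by
    funext hv path
    exact innerA (fun a p q => open_edge a.1 a.2 p q) path hv
  rw [hA, foldl_foldl_flatMap]
  have hinitH : (PySem.List.pyRange 0 (rows - 1)).map
        (fun _ => (PySem.List.pyRange 0 cols).map (fun _ => (1 : Int)))
      = renderGrid (rows - 1) cols PySem.Set.empty := by
    simp [renderGrid, PySem.Set.empty, PySem.Set.contains_eq_listContains]
  have hinitV : (PySem.List.pyRange 0 rows).map
        (fun _ => (PySem.List.pyRange 0 (cols - 1)).map (fun _ => (1 : Int)))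
      = renderGrid rows (cols - 1) PySem.Set.empty := by
    simp [renderGrid, PySem.Set.empty, PySem.Set.contains_eq_listContains]
  rw [hinitH, hinitV]
  exact fold_render rows cols (segsOf paths) hPre PySem.Set.empty PySem.Set.empty

-- B's per-cell any-scan agrees with membership in the accumulated (unwrapped) coordinate sets
lemma anyH_eq_contains (paths : List (String × List (Int × Int))) (r c : Int) :
    (segsOf paths).any (fun s =>
        decide (¬ s.1.1 = s.2.1) && decide (min s.1.1 s.2.1 = r) && decide (s.1.2 = c))
      = PySem.Set.contains
          ((segsOf paths).foldl (addBy wTgt wTgt) (PySem.Set.empty, PySem.Set.empty)).1 (r, c) := by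
  rw [Bool.eq_iff_iff, List.any_eq_true, PySem.Set.contains_iff,
      (mem_foldl_addBy_fst wTgt wTgt (segsOf paths) (PySem.Set.empty, PySem.Set.empty) (r, c)).1]
  simp only [PySem.Set.empty, List.not_mem_nil, false_or, Bool.and_eq_true, decide_eq_true_eq]
  constructor
  · rintro ⟨s, hs, ⟨hne, hmin⟩, hc⟩
    refine ⟨s, hs, hne, ?_⟩
    rw [show wTgt s = (min s.1.1 s.2.1, s.1.2) from by simp [wTgt, hne], hmin, hc]
  · rintro ⟨s, hs, hne, heq⟩
    simp only [wTgt, if_neg hne, Prod.ext_iff] at heq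
    exact ⟨s, hs, ⟨hne, heq.1.symm⟩, heq.2.symm⟩

lemma anyV_eq_contains (paths : List (String × List (Int × Int))) (r c : Int) :
    (segsOf paths).any (fun s =>
        decide (s.1.1 = s.2.1) && decide (s.1.1 = r) && decide (min s.1.2 s.2.2 = c))
      = PySem.Set.contains
          ((segsOf paths).foldl (addBy wTgt wTgt) (PySem.Set.empty, PySem.Set.empty)).2 (r, c) := by
  rw [Bool.eq_iff_iff, List.any_eq_true, PySem.Set.contains_iff,
      (mem_foldl_addBy_fst wTgt wTgt (segsOf paths) (PySem.Set.empty, PySem.Set.empty) (r, c)).2]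
  simp only [PySem.Set.empty, List.not_mem_nil, false_or, Bool.and_eq_true, decide_eq_true_eq]
  constructor
  · rintro ⟨s, hs, ⟨heqv, hr⟩, hc⟩
    refine ⟨s, hs, heqv, ?_⟩
    rw [show wTgt s = (s.1.1, min s.1.2 s.2.2) from by simp [wTgt, heqv], hr, hc]
  · rintro ⟨s, hs, heqv, heq⟩
    simp only [wTgt, if_pos heqv, Prod.ext_iff] at heq
    exact ⟨s, hs, ⟨heqv, heq.1.symm⟩, heq.2.symm⟩

-- port B, reduced to renders of the same kind of coordinate sets (with the raw, unwrapped targets)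
lemma portB_eq_render (rows cols : Int) (paths : List (String × List (Int × Int))) :
    derive_walls_from_paths_alt rows cols paths
      = (renderGrid (rows - 1) cols
           ((segsOf paths).foldl (addBy wTgt wTgt) (PySem.Set.empty, PySem.Set.empty)).1,
         renderGrid rows (cols - 1)
           ((segsOf paths).foldl (addBy wTgt wTgt) (PySem.Set.empty, PySem.Set.empty)).2) := by
  unfold derive_walls_from_paths_alt
  simp only [PySem.List.slice_from_one, List.any_filter]
  show ((PySem.List.pyRange 0 (rows - 1)).map _, (PySem.List.pyRange 0 rows).map _) = _
  unfold renderGrid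
  refine congrArg₂ Prod.mk ?_ ?_
  · apply congrArg (fun f => List.map f (PySem.List.pyRange 0 (rows - 1)))
    funext r
    apply congrArg (fun f => List.map f (PySem.List.pyRange 0 cols))
    funext c
    rw [show (List.flatMap (fun path => path.zip path.tail) (PySem.Dict.ofList paths).values)
          = segsOf paths from rfl,
        anyH_eq_contains paths r c]
  · apply congrArg (fun f => List.map f (PySem.List.pyRange 0 rows))
    funext r
    apply congrArg (fun f => List.map f (PySem.List.pyRange 0 (cols - 1)))
    funext c
    rw [show (List.flatMap (fun path => path.zip path.tail) (PySem.Dict.ofList paths).values)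
          = segsOf paths from rfl,
        anyV_eq_contains paths r c]

-- a non-negative segment's wall coordinate is unchanged by the wrap
lemma wrap_of_segNeg_false (nR nC : Int) (s : (Int × Int) × (Int × Int))
    (h : segNeg s = false) :
    (wrap nR (wTgt s).1, wrap nC (wTgt s).2) = wTgt s := by
  unfold segNeg at h
  unfold wrap
  simp only [decide_eq_false_iff_not, not_or, not_lt] at h
  rw [if_neg (by omega), if_neg (by omega), add_zero, add_zero]

-- ===== VERDICT (by name: the statement is the Claim_ definition above) =====
theorem derive_walls_from_paths_spec : Claim_unchanged_derive_walls_from_paths := by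
  intro rows cols paths _hDom hPre0 hnD0
  have hPre := (pre_iff rows cols paths).1 hPre0
  have hnD : ¬ ∃ s ∈ segsOf paths, segNeg s = true ∧
      ∀ t ∈ segsOf paths, ¬ (isV t = isV s ∧ segNeg t = false ∧
        wTgt t = (if isV s then (wrap rows (wTgt s).1, wrap (cols - 1) (wTgt s).2)
                  else (wrap (rows - 1) (wTgt s).1, wrap cols (wTgt s).2))) :=
    fun hd => hnD0 ((d_iff rows cols paths).2 hd)
  rw [portA_eq_render rows cols paths hPre, portB_eq_render rows cols paths]
  have hcomp : ∀ s ∈ segsOf paths, segNeg s = true →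
      ∃ t ∈ segsOf paths, isV t = isV s ∧ segNeg t = false ∧
        wTgt t = (if isV s then (wrap rows (wTgt s).1, wrap (cols - 1) (wTgt s).2)
                  else (wrap (rows - 1) (wTgt s).1, wrap cols (wTgt s).2)) := by
    intro s hs hneg
    by_contra hno
    exact hnD ⟨s, hs, hneg, fun t ht hc => hno ⟨t, ht, hc⟩⟩
  simp only [Prod.mk.injEq]
  constructor
  · apply renderGrid_congr
    intro r c hr hr2 hc hc2
    rw [(mem_foldl_addBy_fst _ _ (segsOf paths) (PySem.Set.empty, PySem.Set.empty) (r, c)).1,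
        (mem_foldl_addBy_fst wTgt wTgt (segsOf paths) (PySem.Set.empty, PySem.Set.empty) (r, c)).1]
    simp only [PySem.Set.empty, List.not_mem_nil, false_or]
    constructor
    · rintro ⟨s, hsmem, hne, heq⟩
      by_cases hneg : segNeg s = true
      · obtain ⟨t, htmem, hiso, htneg, htw⟩ := hcomp s hsmem hneg
        have hvs : isV s = false := by simp [isV, hne]
        rw [hvs, if_neg (by simp)] at htw
        refine ⟨t, htmem, ?_, by rw [htw, ← heq]⟩
        intro hteq
        rw [hvs] at hiso
        simp [isV, hteq] at hiso
      · have hneg' : segNeg s = false := by simpa using hneg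
        refine ⟨s, hsmem, hne, ?_⟩
        rw [heq, wrap_of_segNeg_false (rows - 1) cols s hneg']
    · rintro ⟨s, hsmem, hne, heq⟩
      have hneg : segNeg s = false := by
        unfold segNeg
        rw [← heq]
        simp; omega
      refine ⟨s, hsmem, hne, ?_⟩
      rw [heq, wrap_of_segNeg_false (rows - 1) cols s hneg]
  · apply renderGrid_congr
    intro r c hr hr2 hc hc2
    rw [(mem_foldl_addBy_fst _ _ (segsOf paths) (PySem.Set.empty, PySem.Set.empty) (r, c)).2,
        (mem_foldl_addBy_fst wTgt wTgt (segsOf paths) (PySem.Set.empty, PySem.Set.empty) (r, c)).2]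
    simp only [PySem.Set.empty, List.not_mem_nil, false_or]
    constructor
    · rintro ⟨s, hsmem, hvv, heq⟩
      by_cases hneg : segNeg s = true
      · obtain ⟨t, htmem, hiso, htneg, htw⟩ := hcomp s hsmem hneg
        have hvs : isV s = true := by simp [isV, hvv]
        rw [hvs, if_pos rfl] at htw
        refine ⟨t, htmem, ?_, by rw [htw, ← heq]⟩
        rw [hvs] at hiso
        simpa [isV] using hiso
      · have hneg' : segNeg s = false := by simpa using hneg
        refine ⟨s, hsmem, hvv, ?_⟩
        rw [heq, wrap_of_segNeg_false rows (cols - 1) s hneg']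
    · rintro ⟨s, hsmem, hvv, heq⟩
      have hneg : segNeg s = false := by
        unfold segNeg
        rw [← heq]
        simp; omega
      refine ⟨s, hsmem, hvv, ?_⟩
      rw [heq, wrap_of_segNeg_false rows (cols - 1) s hneg]

theorem derive_walls_from_paths_changed : Claim_changed_derive_walls_from_paths := by
  unfold Claim_changed_derive_walls_from_paths; decide

theorem derive_walls_from_paths_tight : Claim_exact_derive_walls_from_paths := by
  intro rows cols paths _hDom hPre0 hD heq
  have hPre := (pre_iff rows cols paths).1 hPre0
  obtain ⟨s, hsmem, hneg, huncomp⟩ := (d_iff rows cols paths).1 hD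
  rw [portA_eq_render rows cols paths hPre, portB_eq_render rows cols paths] at heq
  simp only [Prod.mk.injEq] at heq
  have hok := hPre s hsmem
  unfold segOK at hok
  by_cases hv : s.1.1 = s.2.1
  · -- s writes into v
    rw [if_pos hv] at hok
    simp only [decide_eq_true_eq] at hok
    set r := wrap rows (wTgt s).1 with hrdef
    set c := wrap (cols - 1) (wTgt s).2 with hcdef
    have hr : 0 ≤ r ∧ r < rows := by rw [hrdef]; unfold wrap; split_ifs <;> omega
    have hc : 0 ≤ c ∧ c < cols - 1 := by rw [hcdef]; unfold wrap; split_ifs <;> omega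
    have hent := congrArg (fun g => (g.getD r.toNat []).getD c.toNat 2) heq.2
    dsimp only at hent
    rw [renderGrid_entry rows (cols - 1) _ r c hr.1 hr.2 hc.1 hc.2,
        renderGrid_entry rows (cols - 1) _ r c hr.1 hr.2 hc.1 hc.2] at hent
    have hmemA : (r, c) ∈ ((segsOf paths).foldl
        (addBy (fun s => (wrap (rows - 1) (wTgt s).1, wrap cols (wTgt s).2))
          (fun s => (wrap rows (wTgt s).1, wrap (cols - 1) (wTgt s).2)))
        (PySem.Set.empty, PySem.Set.empty)).2 := by
      rw [(mem_foldl_addBy_fst _ _ (segsOf paths) (PySem.Set.empty, PySem.Set.empty) (r, c)).2]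
      exact Or.inr ⟨s, hsmem, hv, rfl⟩
    have hmemB : ¬ (r, c) ∈ ((segsOf paths).foldl (addBy wTgt wTgt)
        (PySem.Set.empty, PySem.Set.empty)).2 := by
      rw [(mem_foldl_addBy_fst wTgt wTgt (segsOf paths) (PySem.Set.empty, PySem.Set.empty) (r, c)).2]
      rintro (hemp | ⟨t, htmem, htv, htw⟩)
      · simp [PySem.Set.empty] at hemp
      · have htneg : segNeg t = false := by
          unfold segNeg; rw [← htw]; simp; omega
        have hvs : isV s = true := by simp [isV, hv]
        exact huncomp t htmem ⟨by simp [isV, htv, hv], htneg,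
          by rw [← htw, hvs, if_pos rfl]⟩
    rw [if_pos ((PySem.Set.contains_iff _ _).2 hmemA),
        if_neg (fun hh => hmemB ((PySem.Set.contains_iff _ _).1 hh))] at hent
    exact absurd hent (by norm_num)
  · -- s writes into h
    rw [if_neg hv] at hok
    simp only [decide_eq_true_eq] at hok
    set r := wrap (rows - 1) (wTgt s).1 with hrdef
    set c := wrap cols (wTgt s).2 with hcdef
    have hr : 0 ≤ r ∧ r < rows - 1 := by rw [hrdef]; unfold wrap; split_ifs <;> omega
    have hc : 0 ≤ c ∧ c < cols := by rw [hcdef]; unfold wrap; split_ifs <;> omega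
    have hent := congrArg (fun g => (g.getD r.toNat []).getD c.toNat 2) heq.1
    dsimp only at hent
    rw [renderGrid_entry (rows - 1) cols _ r c hr.1 hr.2 hc.1 hc.2,
        renderGrid_entry (rows - 1) cols _ r c hr.1 hr.2 hc.1 hc.2] at hent
    have hmemA : (r, c) ∈ ((segsOf paths).foldl
        (addBy (fun s => (wrap (rows - 1) (wTgt s).1, wrap cols (wTgt s).2))
          (fun s => (wrap rows (wTgt s).1, wrap (cols - 1) (wTgt s).2)))
        (PySem.Set.empty, PySem.Set.empty)).1 := by
      rw [(mem_foldl_addBy_fst _ _ (segsOf paths) (PySem.Set.empty, PySem.Set.empty) (r, c)).1]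
      exact Or.inr ⟨s, hsmem, hv, rfl⟩
    have hmemB : ¬ (r, c) ∈ ((segsOf paths).foldl (addBy wTgt wTgt)
        (PySem.Set.empty, PySem.Set.empty)).1 := by
      rw [(mem_foldl_addBy_fst wTgt wTgt (segsOf paths) (PySem.Set.empty, PySem.Set.empty) (r, c)).1]
      rintro (hemp | ⟨t, htmem, htv, htw⟩)
      · simp [PySem.Set.empty] at hemp
      · have htneg : segNeg t = false := by
          unfold segNeg; rw [← htw]; simp; omega
        have hvs : isV s = false := by simp [isV, hv]
        exact huncomp t htmem ⟨by simp [isV, htv, hv], htneg,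
          by rw [← htw, hvs, if_neg (by simp)]⟩
    rw [if_pos ((PySem.Set.contains_iff _ _).2 hmemA),
        if_neg (fun hh => hmemB ((PySem.Set.contains_iff _ _).1 hh))] at hent
    exact absurd hent (by norm_num)
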